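-- pv_equiv track=rewrite | github.com/katfishy/migDNA | mutations.py | seqtodel
-- ===== SOURCE A (Python) =====
-- def seqtodel(seq1: str, seq2: str) -> bool:
--     """Return True if seq2 has a single nucleotide deletion mutation of seq1.
--
--     >>> seqtodel('ATTGC', 'ATTC')
--     True
--     >>> seqtodel('ATTGA', 'GTTC')
--     False
--     """
--
--     i = 0
--     while i < len(seq2) and i < len(seq1) and seq1[i] == seq2[i]:
--         i += 1
--
--     # Check for any deletions that is in the MIDDLE of seq1.
--     if i != len(seq2) and len(seq1) > len(seq2):
--         result = 0
--         for pos in range(i, len(seq2)):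
--             if seq2[pos] == seq1[pos + 1]:
--                 result += 1
--         return result == len(seq1) - (i + 1) and len(seq2) == len(seq1) - 1
--
--     # Check for deletion that is at the END of seq1.
--     else:
--         return len(seq2) == len(seq1) - 1 and i == len(seq2)
-- ===== SOURCE B (Python) =====
-- def seqtodel(seq1: str, seq2: str) -> bool:
--     """Return True if seq2 has a single nucleotide deletion mutation of seq1.
--
--     Brute force: try deleting each character of seq1 and compare with seq2.
--     """
--     if len(seq2) != len(seq1) - 1:
--         return False
--     return any(seq1[:k] + seq1[k + 1:] == seq2 for k in range(len(seq1)))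
-- ===== Notes on version B (the rewrite author's own statement) =====
-- stated objective: simpler
-- what changed: Replaces the first-mismatch scan plus shifted-suffix match-counting with a plain brute force that tries deleting each character of seq1 and compares the result with seq2 (after the same length guard).
import Mathlib
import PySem

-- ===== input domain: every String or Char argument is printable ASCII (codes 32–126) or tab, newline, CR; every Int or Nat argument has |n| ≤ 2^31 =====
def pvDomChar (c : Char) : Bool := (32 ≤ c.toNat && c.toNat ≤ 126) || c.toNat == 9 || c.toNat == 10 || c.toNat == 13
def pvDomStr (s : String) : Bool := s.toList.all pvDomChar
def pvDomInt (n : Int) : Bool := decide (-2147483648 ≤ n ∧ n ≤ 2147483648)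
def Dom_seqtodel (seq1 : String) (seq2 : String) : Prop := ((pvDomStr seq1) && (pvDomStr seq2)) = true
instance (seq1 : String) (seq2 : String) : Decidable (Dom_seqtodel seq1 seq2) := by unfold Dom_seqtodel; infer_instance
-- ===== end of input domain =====

-- B replaces A's first-mismatch scan + shifted-suffix match count by a brute force over every
-- possible single deletion of seq1 (objective: simpler).

-- ===== PORT A =====
-- the while loop 'i = 0; while i < len(seq2) and i < len(seq1) and seq1[i] == seq2[i]: i += 1'
-- as structural recursion over both strings (stops at either end or the first mismatch)
def seqtodelPref : List Char → List Char → Nat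
  | a :: t1, b :: t2 => if a = b then seqtodelPref t1 t2 + 1 else 0
  | _, _ => 0

def seqtodelL (l1 l2 : List Char) : Bool :=
  let i := seqtodelPref l1 l2
  if i ≠ l2.length ∧ l2.length < l1.length then
    -- 'for pos in range(i, len(seq2)): if seq2[pos] == seq1[pos+1]: result += 1'
    -- (all indices accessed are in range here, so pyGetD is exact)
    let result : Int := (PySem.List.pyRange (i : Int) (l2.length : Int) 1).foldl
      (fun r pos => if PySem.List.pyGetD l2 pos ' ' = PySem.List.pyGetD l1 (pos + 1) ' ' then r + 1 else r) 0
    decide (result = (l1.length : Int) - ((i : Int) + 1) ∧ (l2.length : Int) = (l1.length : Int) - 1)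
  else
    decide ((l2.length : Int) = (l1.length : Int) - 1 ∧ i = l2.length)

def seqtodel (seq1 : String) (seq2 : String) : Bool :=
  seqtodelL seq1.toList seq2.toList

-- ===== PORT B =====
-- 'if len(seq2) != len(seq1) - 1: return False; return any(seq1[:k] + seq1[k+1:] == seq2 for k in range(len(seq1)))'
-- (seq1[:k] = take k and seq1[k+1:] = drop (k+1) are exact for the nonnegative k of range)
def seqtodelL_alt (l1 l2 : List Char) : Bool :=
  if (l2.length : Int) ≠ (l1.length : Int) - 1 then false
  else (List.range l1.length).any (fun k => l1.take k ++ l1.drop (k + 1) == l2)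

def seqtodel_alt (seq1 : String) (seq2 : String) : Bool :=
  seqtodelL_alt seq1.toList seq2.toList

-- ===== PRECONDITION & SPEC =====
def Spec_seqtodel (seq1 : String) (seq2 : String) (out : Bool) : Prop := out = seqtodel_alt seq1 seq2
instance (seq1 : String) (seq2 : String) (out : Bool) : Decidable (Spec_seqtodel seq1 seq2 out) := by unfold Spec_seqtodel; infer_instance

-- ===== CLAIM (what is proved, stated in full; the proofs are below) =====
def Claim_equal_seqtodel : Prop := ∀ (seq1 : String) (seq2 : String), Dom_seqtodel seq1 seq2 → Spec_seqtodel seq1 seq2 (seqtodel seq1 seq2)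

-- ===== LEMMAS AND PROOFS =====

lemma seqtodelPref_le_right : ∀ l1 l2 : List Char, seqtodelPref l1 l2 ≤ l2.length := by
  intro l1
  induction l1 with
  | nil => intro l2; cases l2 <;> simp [seqtodelPref]
  | cons a t1 ih =>
    intro l2
    cases l2 with
    | nil => simp [seqtodelPref]
    | cons b t2 =>
      simp only [seqtodelPref, List.length_cons]
      split_ifs with h
      · have := ih t2; omega
      · omega

lemma seqtodelPref_take : ∀ l1 l2 : List Char,
    l1.take (seqtodelPref l1 l2) = l2.take (seqtodelPref l1 l2) := by
  intro l1
  induction l1 with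
  | nil => intro l2; cases l2 <;> simp [seqtodelPref]
  | cons a t1 ih =>
    intro l2
    cases l2 with
    | nil => simp [seqtodelPref]
    | cons b t2 =>
      simp only [seqtodelPref]
      split_ifs with h
      · subst h; simp [List.take_succ_cons, ih t2]
      · simp

lemma seqtodelPref_ne : ∀ (l1 l2 : List Char) (h1 : seqtodelPref l1 l2 < l1.length)
    (h2 : seqtodelPref l1 l2 < l2.length),
    l1[seqtodelPref l1 l2]'h1 ≠ l2[seqtodelPref l1 l2]'h2 := by
  intro l1
  induction l1 with
  | nil => intro l2 h1; simp at h1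
  | cons a t1 ih =>
    intro l2
    cases l2 with
    | nil => intro _ h2; simp at h2
    | cons b t2 =>
      intro h1 h2
      simp only [seqtodelPref] at *
      split_ifs with h
      · simpa using ih t2 (by simpa [seqtodelPref, if_pos h] using h1)
          (by simpa [seqtodelPref, if_pos h] using h2)
      · simpa [seqtodelPref, if_neg h] using h

-- pointwise consequences of 'delete l1 at k = l2'
lemma delete_getElem_lt (l1 l2 : List Char) (k : Nat) (hk : k < l1.length)
    (hdel : l1.take k ++ l1.drop (k + 1) = l2) (pos : Nat) (hpos : pos < l2.length)
    (hpk : pos < k) : l2[pos] = l1[pos]'(by omega) := by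
  subst hdel
  rw [List.getElem_append_left (by simp; omega)]
  simp

lemma delete_getElem_ge (l1 l2 : List Char) (k : Nat) (hk : k < l1.length)
    (hdel : l1.take k ++ l1.drop (k + 1) = l2) (pos : Nat) (hpos : pos < l2.length)
    (hpk : k ≤ pos) :
    l2[pos] = l1[pos + 1]'(by
      have := hdel ▸ hpos
      simp at this; omega) := by
  subst hdel
  have hlen : (l1.take k).length = k := by simp; omega
  have hple : (l1.take k).length ≤ pos := by omega
  rw [List.getElem_append_right hple]
  simp only [List.getElem_drop]
  congr 1
  omega

-- from A's data (full prefix match up to i, shifted match from i on), the deletion at i works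
lemma delete_of_pointwise (l1 l2 : List Char) (hlen : l2.length + 1 = l1.length)
    (i : Nat) (hi2 : i ≤ l2.length) (htake : l1.take i = l2.take i)
    (hall : ∀ pos : Nat, i ≤ pos → (h : pos < l2.length) →
      l2[pos] = l1[pos + 1]'(by omega)) :
    l1.take i ++ l1.drop (i + 1) = l2 := by
  have hdrop : l1.drop (i + 1) = l2.drop i := by
    apply List.ext_getElem
    · simp; omega
    · intro j hj hj'
      simp only [List.getElem_drop] at *
      have hji : i ≤ i + j := by omega
      have hjlt : i + j < l2.length := by simp at hj'; omega
      have heq := hall (i + j) hji hjlt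
      rw [heq]
      have hidx : i + 1 + j = i + j + 1 := by omega
      simp [hidx]
  rw [htake, hdrop, List.take_append_drop]

theorem seqtodelL_eq (l1 l2 : List Char) : seqtodelL l1 l2 = seqtodelL_alt l1 l2 := by
  by_cases hlen : l2.length + 1 = l1.length
  case neg =>
    -- both sides are false when the length guard fails
    have hA : seqtodelL l1 l2 = false := by
      simp only [seqtodelL]
      split_ifs with h
      · simp only [decide_eq_false_iff_not]; rintro ⟨-, h2⟩; omega
      · simp only [decide_eq_false_iff_not]; rintro ⟨h2, -⟩; omega
    have hB : seqtodelL_alt l1 l2 = false := by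
      simp only [seqtodelL_alt]
      rw [if_pos (show (l2.length : Int) ≠ (l1.length : Int) - 1 by omega)]
    rw [hA, hB]
  case pos =>
    have hi2 : seqtodelPref l1 l2 ≤ l2.length := seqtodelPref_le_right l1 l2
    have htake : l1.take (seqtodelPref l1 l2) = l2.take (seqtodelPref l1 l2) := seqtodelPref_take l1 l2
    -- characterize side A as a Prop
    have hAchar : seqtodelL l1 l2 = true ↔
        (seqtodelPref l1 l2 = l2.length ∨ ∀ pos : Nat, seqtodelPref l1 l2 ≤ pos → (h : pos < l2.length) →
          l2[pos] = l1[pos + 1]'(by omega)) := by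
      simp only [seqtodelL]
      by_cases hne : seqtodelPref l1 l2 = l2.length
      · rw [if_neg (by simp [hne])]
        simp only [decide_eq_true_eq]
        constructor
        · rintro ⟨-, -⟩; exact Or.inl hne
        · intro _; exact ⟨by omega, hne⟩
      · rw [if_pos ⟨hne, by omega⟩]
        simp only [decide_eq_true_eq]
        rw [PySem.List.foldl_ite_add_one]
        have hcnt_le := List.countP_le_length
          (l := PySem.List.pyRange (seqtodelPref l1 l2 : Int) (l2.length : Int) 1)
          (p := fun pos => decide (PySem.List.pyGetD l2 pos ' ' = PySem.List.pyGetD l1 (pos + 1) ' '))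
        have hlength : (PySem.List.pyRange (seqtodelPref l1 l2 : Int) (l2.length : Int) 1).length
            = l2.length - seqtodelPref l1 l2 := by
          rw [PySem.List.length_pyRange_one]; omega
        constructor
        · rintro ⟨hcount, -⟩
          right
          have hcnt_eq : (PySem.List.pyRange (seqtodelPref l1 l2 : Int) (l2.length : Int) 1).countP
              (fun pos => decide (PySem.List.pyGetD l2 pos ' ' = PySem.List.pyGetD l1 (pos + 1) ' '))
              = (PySem.List.pyRange (seqtodelPref l1 l2 : Int) (l2.length : Int) 1).length := by
            omega
          have hforall := List.countP_eq_length.mp hcnt_eq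
          intro pos hple hplt
          have hmem : (pos : Int) ∈ PySem.List.pyRange (seqtodelPref l1 l2 : Int) (l2.length : Int) 1 := by
            rw [PySem.List.mem_pyRange_one]
            exact ⟨by exact_mod_cast hple, by exact_mod_cast hplt⟩
          have h2 := hforall _ hmem
          simp only [decide_eq_true_eq] at h2
          rw [show ((pos : Int) + 1) = ((pos + 1 : Nat) : Int) by push_cast; ring] at h2
          simp only [PySem.List.pyGetD_natCast] at h2
          rw [List.getD_eq_getElem _ _ hplt, List.getD_eq_getElem _ _ (by omega)] at h2
          exact h2
        · intro hcase
          rcases hcase with hcase | hall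
          · exact absurd hcase hne
          · constructor
            · have hcnt_eq : (PySem.List.pyRange (seqtodelPref l1 l2 : Int) (l2.length : Int) 1).countP
                  (fun pos => decide (PySem.List.pyGetD l2 pos ' ' = PySem.List.pyGetD l1 (pos + 1) ' '))
                  = (PySem.List.pyRange (seqtodelPref l1 l2 : Int) (l2.length : Int) 1).length := by
                apply List.countP_eq_length.mpr
                intro x hmem
                rw [PySem.List.mem_pyRange_one] at hmem
                obtain ⟨hx1, hx2⟩ := hmem
                have hx0 : 0 ≤ x := le_trans (Int.natCast_nonneg _) hx1
                obtain ⟨p, rfl⟩ : ∃ p : Nat, x = (p : Int) := ⟨x.toNat, (Int.toNat_of_nonneg hx0).symm⟩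
                have hplt : p < l2.length := by exact_mod_cast hx2
                have hpge : seqtodelPref l1 l2 ≤ p := by exact_mod_cast hx1
                have hp := hall p hpge hplt
                simp only [decide_eq_true_eq]
                rw [show ((p : Int) + 1) = ((p + 1 : Nat) : Int) by push_cast; ring]
                simp only [PySem.List.pyGetD_natCast]
                rw [List.getD_eq_getElem _ _ hplt, List.getD_eq_getElem _ _ (by omega)]
                exact hp
              · rw [hcnt_eq, hlength]; omega
            · omega
    -- characterize side B as a Prop
    have hBchar : seqtodelL_alt l1 l2 = true ↔
        ∃ k, k < l1.length ∧ l1.take k ++ l1.drop (k + 1) = l2 := by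
      simp only [seqtodelL_alt]
      rw [if_neg (by omega)]
      simp [List.any_eq_true, List.mem_range]
    rw [Bool.eq_iff_iff, hAchar, hBchar]
    constructor
    · rintro (hfull | hall)
      · refine ⟨l2.length, by omega, ?_⟩
        apply delete_of_pointwise l1 l2 hlen l2.length (le_refl _) (hfull ▸ htake)
        intro pos hple hplt; omega
      · exact ⟨seqtodelPref l1 l2, by omega,
          delete_of_pointwise l1 l2 hlen _ hi2 htake hall⟩
    · rintro ⟨k, hk, hdel⟩
      by_cases hfull : seqtodelPref l1 l2 = l2.length
      · exact Or.inl hfull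
      · right
        have hilt : seqtodelPref l1 l2 < l2.length := by omega
        have hne := seqtodelPref_ne l1 l2 (by omega) hilt
        have hki : k ≤ seqtodelPref l1 l2 := by
          by_contra hgt
          exact hne ((delete_getElem_lt l1 l2 k hk hdel _ hilt (by omega)).symm)
        intro pos hple hplt
        exact delete_getElem_ge l1 l2 k hk hdel pos hplt (by omega)

-- ===== VERDICT (by name: the statement is the Claim_ definition above) =====
theorem seqtodel_spec : Claim_equal_seqtodel := by
  intro seq1 seq2 _
  unfold Spec_seqtodel seqtodel seqtodel_alt
  exact seqtodelL_eq seq1.toList seq2.toList
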